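-- pv_equiv track=rewrite | github.com/r4lv/idlwrap | idlwrap/idlwrap.py | _list_r_trim
-- ===== SOURCE A (Python) =====
-- def _list_r_trim(l, what=1):
--     l = list(l)
--     popped = False
--     while len(l)>0 and l[-1] == what:
--         popped = True
--         l.pop()
--
--     if popped and len(l)==0:
--         l = [what]
--
--     return l
-- ===== SOURCE B (Python) =====
-- def _list_r_trim(l, what=1):
--     l = list(l)
--     last = -1
--     for i, x in enumerate(l):
--         if x != what:
--             last = i
--     if last == -1:
--         return [what] if l else []
--     return l[:last + 1]
-- ===== Notes on version B (the rewrite author's own statement) =====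
-- stated objective: alternative
-- what changed: Replaces the backward pop-until-mismatch while loop (and its popped flag) with a single forward enumerate scan computing the index of the last element not equal to 'what', followed by one slice.
import Mathlib
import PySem

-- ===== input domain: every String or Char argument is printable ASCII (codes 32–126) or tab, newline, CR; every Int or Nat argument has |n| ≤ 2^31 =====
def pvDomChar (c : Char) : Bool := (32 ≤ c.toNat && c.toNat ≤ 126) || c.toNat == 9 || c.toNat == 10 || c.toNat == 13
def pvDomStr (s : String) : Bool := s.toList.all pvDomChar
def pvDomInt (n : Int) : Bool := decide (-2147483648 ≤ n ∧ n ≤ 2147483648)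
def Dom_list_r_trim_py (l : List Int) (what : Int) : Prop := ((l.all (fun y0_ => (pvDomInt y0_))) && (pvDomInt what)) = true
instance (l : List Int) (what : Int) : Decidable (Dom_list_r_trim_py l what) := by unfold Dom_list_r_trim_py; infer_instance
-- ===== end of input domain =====

-- B replaces A's backward pop-until-mismatch loop with a forward scan for the last non-`what`
-- index followed by one slice (alternative decomposition; same return value).


-- ===== PORT A =====
-- while len(l)>0 and l[-1] == what: popped = True; l.pop()
def listRTrimLoop (l : List Int) (what : Int) (popped : Bool) : List Int × Bool :=
  if h : l.length > 0 ∧ PySem.List.pyGet? l (-1) = some what then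
    listRTrimLoop l.dropLast what true
  else
    (l, popped)
termination_by l.length
decreasing_by
  have : l ≠ [] := by intro hn; simp [hn] at h
  simp [List.length_dropLast]
  omega

def list_r_trim_py (l : List Int) (what : Int) : List Int :=
  match listRTrimLoop l what false with
  | (l', popped) => if popped ∧ l'.length = 0 then [what] else l'

-- ===== PORT B =====
def list_r_trim_py_alt (l : List Int) (what : Int) : List Int :=
  let last := (PySem.List.enumerate l 0).foldl
    (fun last p => if p.2 ≠ what then p.1 else last) (-1)
  if last = -1 then (if l ≠ [] then [what] else [])
  else PySem.List.slice l none (some (last + 1))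

-- ===== PRECONDITION & SPEC =====
def Spec_list_r_trim_py (l : List Int) (what : Int) (out : List Int) : Prop := out = list_r_trim_py_alt l what
instance (l : List Int) (what : Int) (out : List Int) : Decidable (Spec_list_r_trim_py l what out) := by unfold Spec_list_r_trim_py; infer_instance

-- ===== CLAIM (what is proved, stated in full; the proofs are below) =====
def Claim_equal_list_r_trim_py : Prop := ∀ (l : List Int) (what : Int), Dom_list_r_trim_py l what → Spec_list_r_trim_py l what (list_r_trim_py l what)

-- ===== LEMMAS AND PROOFS =====

-- the index of the last element ≠ what (or -1), as B's fold computes it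
def pvLastIdx (l : List Int) (what : Int) : Int :=
  (PySem.List.enumerate l 0).foldl (fun last p => if p.2 ≠ what then p.1 else last) (-1)

theorem pvLastIdx_append (l : List Int) (x what : Int) :
    pvLastIdx (l ++ [x]) what = if x ≠ what then (l.length : Int) else pvLastIdx l what := by
  simp [pvLastIdx, PySem.List.enumerate_append, PySem.List.enumerate_cons, List.foldl_append]

theorem pvLastIdx_bounds (l : List Int) (what : Int) :
    -1 ≤ pvLastIdx l what ∧ pvLastIdx l what < (l.length : Int) := by
  induction l using List.reverseRecOn with
  | nil => simp [pvLastIdx, PySem.List.enumerate_nil]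
  | append_singleton l x ih =>
    rw [pvLastIdx_append]
    by_cases hx : x = what <;> simp [hx] <;> try omega

theorem listRTrimLoop_nil (what : Int) (p : Bool) :
    listRTrimLoop [] what p = ([], p) := by
  rw [listRTrimLoop]; simp

theorem listRTrimLoop_append (l : List Int) (x what : Int) (p : Bool) :
    listRTrimLoop (l ++ [x]) what p =
      if x = what then listRTrimLoop l what true else (l ++ [x], p) := by
  rw [listRTrimLoop]
  by_cases hx : x = what
  · simp [hx, PySem.List.pyGet?_neg_one_append_singleton]
  · simp [hx, PySem.List.pyGet?_neg_one_append_singleton]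

theorem listRTrimLoop_true_flag (l : List Int) (what : Int) :
    (listRTrimLoop l what true).2 = true := by
  induction l using List.reverseRecOn with
  | nil => simp [listRTrimLoop_nil]
  | append_singleton l x ih =>
    rw [listRTrimLoop_append]
    by_cases hx : x = what <;> simp [hx, ih]

theorem listRTrimLoop_fst (l : List Int) (what : Int) (p : Bool) :
    (listRTrimLoop l what p).1 =
      if pvLastIdx l what = -1 then [] else l.take ((pvLastIdx l what).toNat + 1) := by
  induction l using List.reverseRecOn generalizing p with
  | nil => simp [listRTrimLoop_nil, pvLastIdx, PySem.List.enumerate_nil]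
  | append_singleton l x ih =>
    rw [listRTrimLoop_append, pvLastIdx_append]
    by_cases hx : x = what
    · rw [if_pos hx]
      simp only [ne_eq, not_true_eq_false, if_false, hx]
      rw [ih]
      by_cases hl : pvLastIdx l what = -1
      · simp [hl]
      · have hb := pvLastIdx_bounds l what
        have htk : (pvLastIdx l what).toNat + 1 ≤ l.length := by omega
        simp [hl, List.take_append_of_le_length htk]
    · have hlen : (l.length : Int) ≠ -1 := by omega
      rw [if_neg hx, if_pos hx, if_neg hlen]
      simp

theorem listRTrimLoop_snd_of_nil (l : List Int) (what : Int) (hl : l ≠ [])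
    (hr : (listRTrimLoop l what false).1 = []) :
    (listRTrimLoop l what false).2 = true := by
  induction l using List.reverseRecOn with
  | nil => exact absurd rfl hl
  | append_singleton l x ih =>
    rw [listRTrimLoop_append] at hr ⊢
    by_cases hx : x = what
    · simp [hx, listRTrimLoop_true_flag]
    · simp [hx] at hr

-- ===== VERDICT (by name: the statement is the Claim_ definition above) =====
theorem list_r_trim_py_spec : Claim_equal_list_r_trim_py := by
  intro l what _
  unfold Spec_list_r_trim_py list_r_trim_py list_r_trim_py_alt
  have hfst := listRTrimLoop_fst l what false
  have hb := pvLastIdx_bounds l what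
  rcases hE : listRTrimLoop l what false with ⟨r, pd⟩
  rw [hE] at hfst
  simp only at hfst
  show (if pd = true ∧ r.length = 0 then [what] else r) = _
  by_cases hidx : pvLastIdx l what = -1
  · -- fully trimmed (or empty): r = []
    rw [if_pos hidx] at hfst
    by_cases hl : l = []
    · subst hl
      rw [listRTrimLoop_nil] at hE
      cases hE
      simp [PySem.List.enumerate_nil]
    · have hpd : pd = true := by
        have := listRTrimLoop_snd_of_nil l what hl
        rw [hE] at this; exact this hfst
      rw [if_pos ⟨hpd, by simp [hfst]⟩]
      show _ = (if pvLastIdx l what = -1 then (if l ≠ [] then [what] else []) else _)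
      rw [if_pos hidx, if_pos hl]
  · rw [if_neg hidx] at hfst
    have hge : 0 ≤ pvLastIdx l what := by omega
    have hlt : (pvLastIdx l what).toNat < l.length := by omega
    have hlne : l ≠ [] := by
      intro h; rw [h] at hlt; simp at hlt
    have hrne : r ≠ [] := by
      rw [hfst]; simp [List.take_eq_nil_iff, hlne]
    have hcond : ¬ (pd = true ∧ r.length = 0) := by
      rintro ⟨_, h0⟩; exact hrne (List.eq_nil_of_length_eq_zero h0)
    rw [if_neg hcond, hfst]
    show _ = (if pvLastIdx l what = -1 then _ else PySem.List.slice l none (some (pvLastIdx l what + 1)))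
    rw [if_neg hidx, PySem.List.slice_to l (by omega)]
    congr 1
    omega
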